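-- pv_equiv track=rewrite | github.com/aidenisaman/pyRacerzRevamped | modules/ai_track_model.py | _components_touching_starts
-- ===== SOURCE A (Python) =====
-- from collections import deque
--
-- def _components_touching_starts(mask, starts):
--   starts_in = [s for s in starts if s in mask]
--   if not starts_in:
--     return []
--
--   seen_global = set()
--   components = []
--   for s in starts_in:
--     if s in seen_global:
--       continue
--     q = deque([s])
--     comp = set([s])
--     seen_global.add(s)
--     while q:
--       cur = q.popleft()
--       for nxt in (
--         (cur[0] + 1, cur[1]),
--         (cur[0] - 1, cur[1]),
--         (cur[0], cur[1] + 1),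
--         (cur[0], cur[1] - 1),
--       ):
--         if nxt in mask and nxt not in seen_global:
--           seen_global.add(nxt)
--           comp.add(nxt)
--           q.append(nxt)
--     components.append(comp)
--   return components
-- ===== SOURCE B (Python) =====
-- def _components_touching_starts(mask, starts):
--   mask_set = set(mask)
--   out = []
--   for s in starts:
--     if s not in mask_set or any(s in c for c in out):
--       continue
--     comp = [s]
--     members = {s}
--     grew = True
--     while grew:
--       grew = False
--       for c in list(comp):
--         for n in ((c[0] + 1, c[1]), (c[0] - 1, c[1]), (c[0], c[1] + 1), (c[0], c[1] - 1)):
--           if n in mask_set and n not in members: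
--             members.add(n)
--             comp.append(n)
--             grew = True
--     out.append(set(comp))
--   return out
-- ===== Notes on version B (the rewrite author's own statement) =====
-- stated objective: alternative
-- what changed: Replaces the per-start deque BFS with a shared global visited set by a naive fixpoint closure: each component is grown by rescanning the whole component list until a full pass adds no cell, and starts already covered are detected by membership in the emitted components instead of a global seen set.
import Mathlib
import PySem

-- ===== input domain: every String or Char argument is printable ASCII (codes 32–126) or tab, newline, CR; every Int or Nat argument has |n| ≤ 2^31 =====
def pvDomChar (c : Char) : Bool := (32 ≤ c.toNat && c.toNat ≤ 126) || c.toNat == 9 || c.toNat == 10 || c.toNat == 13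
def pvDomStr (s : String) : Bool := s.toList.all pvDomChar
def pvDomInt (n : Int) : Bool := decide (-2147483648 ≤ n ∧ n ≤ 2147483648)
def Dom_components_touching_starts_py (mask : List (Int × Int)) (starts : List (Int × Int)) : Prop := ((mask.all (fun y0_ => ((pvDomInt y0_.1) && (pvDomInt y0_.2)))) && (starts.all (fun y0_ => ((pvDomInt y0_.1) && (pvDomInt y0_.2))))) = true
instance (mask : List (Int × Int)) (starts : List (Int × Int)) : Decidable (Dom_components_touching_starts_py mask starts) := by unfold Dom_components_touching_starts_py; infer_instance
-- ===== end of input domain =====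

-- B replaces A's per-start deque BFS (with a global visited set) by a naive fixpoint closure that rescans the whole component until a pass adds nothing, testing covered starts against the emitted components; same return value (objective: alternative).


-- termination measure shared by both ports: how many cells of `cells` are not yet in `seen`
def ctsUnseen (cells : List (Int × Int)) (seen : PySem.Set (Int × Int)) : Nat :=
  (cells.filter (fun x => decide (x ∉ seen))).length

-- termination support: adding an unseen cell of `cells` to `seen` strictly shrinks the unseen count
theorem ctsUnseen_add_lt (cells : List (Int × Int)) (s : PySem.Set (Int × Int)) (nxt : Int × Int)
    (h1 : nxt ∈ cells) (h2 : nxt ∉ s) :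
    ctsUnseen cells (PySem.Set.add s nxt) < ctsUnseen cells s := by
  unfold ctsUnseen
  have key : cells.filter (fun x => decide (x ∉ PySem.Set.add s nxt))
      = (cells.filter (fun x => decide (x ∉ s))).filter (fun x => decide (x ∉ PySem.Set.add s nxt)) := by
    rw [List.filter_filter]
    apply List.filter_congr
    intro x _
    by_cases hx : x ∈ PySem.Set.add s nxt
    · simp [hx]
    · have hxs : x ∉ s := fun hc => hx ((PySem.Set.mem_add s nxt x).mpr (Or.inl hc))
      simp [hx, hxs]
  rw [key]
  apply List.length_filter_lt_length_iff_exists.mpr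
  refine ⟨nxt, ?_, ?_⟩
  · exact List.mem_filter.mpr ⟨h1, by simp [h2]⟩
  · simp [PySem.Set.mem_add s nxt nxt]

-- ===== PORT A =====
-- state = (seen_global, comp, q); one neighbour candidate of the inner `for nxt in (...)` loop
def ctsVisitA (mask : List (Int × Int)) (nxt : Int × Int)
    (st : PySem.Set (Int × Int) × PySem.Set (Int × Int) × List (Int × Int)) :
    PySem.Set (Int × Int) × PySem.Set (Int × Int) × List (Int × Int) :=
  if nxt ∈ mask ∧ nxt ∉ st.1 then
    (PySem.Set.add st.1 nxt, PySem.Set.add st.2.1 nxt, st.2.2 ++ [nxt])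
  else st

-- the four neighbours of `cur`, in A's tuple order
def ctsStepA (mask : List (Int × Int)) (cur : Int × Int)
    (st : PySem.Set (Int × Int) × PySem.Set (Int × Int) × List (Int × Int)) :
    PySem.Set (Int × Int) × PySem.Set (Int × Int) × List (Int × Int) :=
  ctsVisitA mask (cur.1, cur.2 - 1)
    (ctsVisitA mask (cur.1, cur.2 + 1)
      (ctsVisitA mask (cur.1 - 1, cur.2)
        (ctsVisitA mask (cur.1 + 1, cur.2) st)))

theorem ctsVisitA_measure (mask : List (Int × Int)) (nxt : Int × Int)
    (st : PySem.Set (Int × Int) × PySem.Set (Int × Int) × List (Int × Int)) :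
    3 * ctsUnseen mask (ctsVisitA mask nxt st).1 + (ctsVisitA mask nxt st).2.2.length ≤
      3 * ctsUnseen mask st.1 + st.2.2.length := by
  by_cases h : nxt ∈ mask ∧ nxt ∉ st.1
  · have hlt := ctsUnseen_add_lt mask st.1 nxt h.1 h.2
    simp only [ctsVisitA, if_pos h, List.length_append, List.length_cons, List.length_nil]
    omega
  · simp [ctsVisitA, h]

theorem ctsStepA_measure (mask : List (Int × Int)) (cur : Int × Int)
    (st : PySem.Set (Int × Int) × PySem.Set (Int × Int) × List (Int × Int)) :
    3 * ctsUnseen mask (ctsStepA mask cur st).1 + (ctsStepA mask cur st).2.2.length ≤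
      3 * ctsUnseen mask st.1 + st.2.2.length := by
  unfold ctsStepA
  calc _ ≤ _ := ctsVisitA_measure mask _ _
    _ ≤ _ := ctsVisitA_measure mask _ _
    _ ≤ _ := ctsVisitA_measure mask _ _
    _ ≤ _ := ctsVisitA_measure mask _ _

-- the `while q:` loop of A; returns (comp, seen_global)
def ctsBfsA (mask : List (Int × Int)) (q : List (Int × Int))
    (seen comp : PySem.Set (Int × Int)) :
    PySem.Set (Int × Int) × PySem.Set (Int × Int) :=
  match q with
  | [] => (comp, seen)
  | cur :: rest =>
    let st := ctsStepA mask cur (seen, comp, rest)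
    ctsBfsA mask st.2.2 st.1 st.2.1
termination_by 3 * ctsUnseen mask seen + q.length
decreasing_by
  have h := ctsStepA_measure mask cur (seen, comp, rest)
  simp only [List.length_cons] at *
  omega

-- the `for s in starts_in:` loop; comps is the accumulated `components`
def ctsOuterA (mask : List (Int × Int)) :
    List (Int × Int) → PySem.Set (Int × Int) → List (List (Int × Int)) → List (List (Int × Int))
  | [], _, comps => comps
  | s :: rest, seen, comps =>
    if s ∈ seen then ctsOuterA mask rest seen comps
    else
      let r := ctsBfsA mask [s] (PySem.Set.add seen s) (PySem.Set.ofList [s])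
      ctsOuterA mask rest r.2 (comps ++ [r.1])

def components_touching_starts_py (mask : List (Int × Int)) (starts : List (Int × Int)) : List (List (Int × Int)) :=
  let starts_in := starts.filter (fun s => decide (s ∈ mask))
  if starts_in = [] then []
  else ctsOuterA mask starts_in PySem.Set.empty []

-- ===== PORT B =====
-- state = (members, comp, grew); one neighbour candidate of `for n in (...)`
def bVisit (maskS : PySem.Set (Int × Int)) (n : Int × Int)
    (st : PySem.Set (Int × Int) × List (Int × Int) × Bool) :
    PySem.Set (Int × Int) × List (Int × Int) × Bool :=
  if n ∈ maskS ∧ n ∉ st.1 then (PySem.Set.add st.1 n, st.2.1 ++ [n], true) else st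

-- the four neighbours of `c`, in B's tuple order
def bCell (maskS : PySem.Set (Int × Int)) (c : Int × Int)
    (st : PySem.Set (Int × Int) × List (Int × Int) × Bool) :
    PySem.Set (Int × Int) × List (Int × Int) × Bool :=
  bVisit maskS (c.1, c.2 - 1)
    (bVisit maskS (c.1, c.2 + 1)
      (bVisit maskS (c.1 - 1, c.2)
        (bVisit maskS (c.1 + 1, c.2) st)))

-- the `for c in list(comp):` pass over the round's snapshot
def bPass (maskS : PySem.Set (Int × Int)) :
    List (Int × Int) → PySem.Set (Int × Int) × List (Int × Int) × Bool →
    PySem.Set (Int × Int) × List (Int × Int) × Bool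
  | [], st => st
  | c :: rest, st => bPass maskS rest (bCell maskS c st)

-- composition of the termination measure facts along the fold
theorem bMeasComp {u0 u1 u2 : Nat} {g0 g1 g2 : Bool}
    (h1 : u1 ≤ u0 ∧ (g1 = true → g0 = true ∨ u1 < u0))
    (h2 : u2 ≤ u1 ∧ (g2 = true → g1 = true ∨ u2 < u1)) :
    u2 ≤ u0 ∧ (g2 = true → g0 = true ∨ u2 < u0) := by
  obtain ⟨a1, b1⟩ := h1; obtain ⟨a2, b2⟩ := h2
  refine ⟨le_trans a2 a1, fun hg => ?_⟩
  rcases b2 hg with h | h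
  · rcases b1 h with h' | h'
    · exact Or.inl h'
    · exact Or.inr (lt_of_le_of_lt a2 h')
  · exact Or.inr (lt_of_lt_of_le h a1)

theorem bVisit_measure (maskS : PySem.Set (Int × Int)) (n : Int × Int)
    (st : PySem.Set (Int × Int) × List (Int × Int) × Bool) :
    ctsUnseen maskS (bVisit maskS n st).1 ≤ ctsUnseen maskS st.1 ∧
      ((bVisit maskS n st).2.2 = true → st.2.2 = true ∨ ctsUnseen maskS (bVisit maskS n st).1 < ctsUnseen maskS st.1) := by
  by_cases h : n ∈ maskS ∧ n ∉ st.1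
  · have hlt := ctsUnseen_add_lt maskS st.1 n h.1 h.2
    simp only [bVisit, if_pos h]
    exact ⟨le_of_lt hlt, fun _ => Or.inr hlt⟩
  · simp [bVisit, h]

theorem bCell_measure (maskS : PySem.Set (Int × Int)) (c : Int × Int)
    (st : PySem.Set (Int × Int) × List (Int × Int) × Bool) :
    ctsUnseen maskS (bCell maskS c st).1 ≤ ctsUnseen maskS st.1 ∧
      ((bCell maskS c st).2.2 = true → st.2.2 = true ∨ ctsUnseen maskS (bCell maskS c st).1 < ctsUnseen maskS st.1) := by
  unfold bCell
  exact bMeasComp (bMeasComp (bMeasComp (bVisit_measure maskS _ st) (bVisit_measure maskS _ _)) (bVisit_measure maskS _ _)) (bVisit_measure maskS _ _)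

theorem bPass_measure (maskS : PySem.Set (Int × Int)) (l : List (Int × Int)) :
    ∀ (st : PySem.Set (Int × Int) × List (Int × Int) × Bool),
    ctsUnseen maskS (bPass maskS l st).1 ≤ ctsUnseen maskS st.1 ∧
      ((bPass maskS l st).2.2 = true → st.2.2 = true ∨ ctsUnseen maskS (bPass maskS l st).1 < ctsUnseen maskS st.1) := by
  induction l with
  | nil => intro st; exact ⟨le_refl _, fun h => Or.inl h⟩
  | cons c rest ih =>
    intro st
    exact bMeasComp (bCell_measure maskS c st) (ih (bCell maskS c st))

-- the `while grew:` loop of B; returns the final comp list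
def bLoop (maskS : PySem.Set (Int × Int)) (members : PySem.Set (Int × Int)) (comp : List (Int × Int)) : List (Int × Int) :=
  let st := bPass maskS comp (members, comp, false)
  if st.2.2 = true then bLoop maskS st.1 st.2.1 else comp
termination_by ctsUnseen maskS members
decreasing_by
  have h := (bPass_measure maskS comp (members, comp, false)).2 (by assumption)
  simp only [Bool.false_eq_true, false_or] at h
  exact h

-- the `for s in starts:` loop with the combined skip test against the emitted components
def bOuter (maskS : PySem.Set (Int × Int)) :
    List (Int × Int) → List (List (Int × Int)) → List (List (Int × Int))
  | [], out => out
  | s :: rest, out =>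
    if s ∉ maskS ∨ (out.any (fun c => PySem.Set.contains c s)) = true then bOuter maskS rest out
    else bOuter maskS rest (out ++ [PySem.Set.ofList (bLoop maskS (PySem.Set.ofList [s]) [s])])

def components_touching_starts_py_alt (mask : List (Int × Int)) (starts : List (Int × Int)) : List (List (Int × Int)) :=
  bOuter (PySem.Set.ofList mask) starts []

-- ===== PRECONDITION & SPEC =====
def Spec_components_touching_starts_py (mask : List (Int × Int)) (starts : List (Int × Int)) (out : List (List (Int × Int))) : Prop := out = components_touching_starts_py_alt mask starts
instance (mask : List (Int × Int)) (starts : List (Int × Int)) (out : List (List (Int × Int))) : Decidable (Spec_components_touching_starts_py mask starts out) := by unfold Spec_components_touching_starts_py; infer_instance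

-- ===== CLAIM (what is proved, stated in full; the proofs are below) =====
def Claim_equal_components_touching_starts_py : Prop := ∀ (mask : List (Int × Int)) (starts : List (Int × Int)), Dom_components_touching_starts_py mask starts → Spec_components_touching_starts_py mask starts (components_touching_starts_py mask starts)

-- ===== LEMMAS AND PROOFS =====

theorem ctsBfsA_nil (mask : List (Int × Int)) (seen comp : PySem.Set (Int × Int)) :
    ctsBfsA mask [] seen comp = (comp, seen) := by rw [ctsBfsA]

theorem ctsBfsA_cons (mask : List (Int × Int)) (cur : Int × Int) (rest : List (Int × Int))
    (seen comp : PySem.Set (Int × Int)) :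
    ctsBfsA mask (cur :: rest) seen comp =
      (let st := ctsStepA mask cur (seen, comp, rest)
       ctsBfsA mask st.2.2 st.1 st.2.1) := by rw [ctsBfsA]

theorem bLoop_eq (maskS members : PySem.Set (Int × Int)) (comp : List (Int × Int)) :
    bLoop maskS members comp =
      (let st := bPass maskS comp (members, comp, false)
       if st.2.2 = true then bLoop maskS st.1 st.2.1 else comp) := by rw [bLoop]

-- the A-side ring machine: process a whole layer of the queue at once
def ctsRing (mask : List (Int × Int)) :
    List (Int × Int) → PySem.Set (Int × Int) × PySem.Set (Int × Int) × List (Int × Int) →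
    PySem.Set (Int × Int) × PySem.Set (Int × Int) × List (Int × Int)
  | [], st => st
  | c :: rest, st => ctsRing mask rest (ctsStepA mask c st)

theorem ctsVisitA_append (mask : List (Int × Int)) (nxt : Int × Int)
    (seen comp : PySem.Set (Int × Int)) (l1 l2 : List (Int × Int)) :
    ctsVisitA mask nxt (seen, comp, l1 ++ l2) =
      ((ctsVisitA mask nxt (seen, comp, l2)).1,
       (ctsVisitA mask nxt (seen, comp, l2)).2.1,
       l1 ++ (ctsVisitA mask nxt (seen, comp, l2)).2.2) := by
  by_cases h : nxt ∈ mask ∧ nxt ∉ seen <;> simp [ctsVisitA, h]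

theorem ctsStepA_append (mask : List (Int × Int)) (cur : Int × Int)
    (seen comp : PySem.Set (Int × Int)) (l1 l2 : List (Int × Int)) :
    ctsStepA mask cur (seen, comp, l1 ++ l2) =
      ((ctsStepA mask cur (seen, comp, l2)).1,
       (ctsStepA mask cur (seen, comp, l2)).2.1,
       l1 ++ (ctsStepA mask cur (seen, comp, l2)).2.2) := by
  unfold ctsStepA
  simp only [ctsVisitA_append]

theorem ctsBfsA_ring (mask : List (Int × Int)) (fr : List (Int × Int)) :
    ∀ (seen comp : PySem.Set (Int × Int)) (acc : List (Int × Int)),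
      ctsBfsA mask (fr ++ acc) seen comp =
        (let st := ctsRing mask fr (seen, comp, acc)
         ctsBfsA mask st.2.2 st.1 st.2.1) := by
  induction fr with
  | nil => intro seen comp acc; simp [ctsRing]
  | cons cur rest ih =>
    intro seen comp acc
    simp only [List.cons_append, ctsBfsA_cons, ctsStepA_append, ih, ctsRing, Prod.mk.eta]

-- 4-adjacency of grid cells, and its symmetry
def ctsAdj (c n : Int × Int) : Prop :=
  n = (c.1 + 1, c.2) ∨ n = (c.1 - 1, c.2) ∨ n = (c.1, c.2 + 1) ∨ n = (c.1, c.2 - 1)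

theorem ctsAdj_symm {c n : Int × Int} (h : ctsAdj c n) : ctsAdj n c := by
  rcases h with h | h | h | h <;> subst h <;> unfold ctsAdj
  · exact Or.inr (Or.inl (by simp))
  · exact Or.inl (by simp)
  · exact Or.inr (Or.inr (Or.inr (by simp)))
  · exact Or.inr (Or.inr (Or.inl (by simp)))

-- every in-mask neighbour of a cell of `done` is already in `seen`
def ctsProcd (mask seen done : List (Int × Int)) : Prop :=
  ∀ c ∈ done, ∀ n, ctsAdj c n → n ∈ mask → n ∈ seen

-- the already-emitted region g: inside the mask and closed under in-mask adjacency
def ctsGood (mask g : List (Int × Int)) : Prop :=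
  (∀ c ∈ g, c ∈ mask) ∧ ctsProcd mask g g

-- an in-mask neighbour of an in-mask cell outside g is itself outside g
theorem ctsNotG {mask g : List (Int × Int)} (hg : ctsGood mask g) {c n : Int × Int}
    (hc : c ∈ mask) (hcg : c ∉ g) (hadj : ctsAdj c n) : n ∈ mask → n ∉ g :=
  fun _ hng => hcg (hg.2 n hng c (ctsAdj_symm hadj) hc)

-- the simulation relation between A's ring state and B's pass state
def ctsRel (mask g comp0 : List (Int × Int))
    (sa : PySem.Set (Int × Int) × PySem.Set (Int × Int) × List (Int × Int))
    (sb : PySem.Set (Int × Int) × List (Int × Int) × Bool) : Prop :=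
  sb.1 = sa.2.1 ∧ sb.2.1 = sa.2.1 ∧ sa.1 = g ++ sa.2.1 ∧ sa.2.1 = comp0 ++ sa.2.2 ∧
    sb.2.2 = decide (sa.2.2 ≠ []) ∧ (∀ c ∈ sa.2.1, c ∈ mask ∧ c ∉ g) ∧ sa.2.1.Nodup

theorem ctsVisit_rel {mask g comp0 : List (Int × Int)} {n : Int × Int}
    {sa : PySem.Set (Int × Int) × PySem.Set (Int × Int) × List (Int × Int)}
    {sb : PySem.Set (Int × Int) × List (Int × Int) × Bool}
    (hn : n ∈ mask → n ∉ g) (h : ctsRel mask g comp0 sa sb) :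
    ctsRel mask g comp0 (ctsVisitA mask n sa) (bVisit (PySem.Set.ofList mask) n sb) := by
  obtain ⟨h1, h2, h3, h4, h5, h6, h7⟩ := h
  by_cases hm : n ∈ mask
  · by_cases hs : n ∈ sa.1
    · have hng : n ∉ g := hn hm
      have hcomp : n ∈ sa.2.1 := by
        rw [h3] at hs
        rcases List.mem_append.mp hs with h | h
        · exact absurd h hng
        · exact h
      have hA : ¬ (n ∈ mask ∧ n ∉ sa.1) := fun hc => hc.2 hs
      have hB : ¬ (n ∈ PySem.Set.ofList mask ∧ n ∉ sb.1) := fun hc => hc.2 (h1 ▸ hcomp)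
      simp only [ctsVisitA, bVisit, if_neg hA, if_neg hB]
      exact ⟨h1, h2, h3, h4, h5, h6, h7⟩
    · have hnc : n ∉ sa.2.1 := fun hc => hs (h3 ▸ List.mem_append.mpr (Or.inr hc))
      have hA : n ∈ mask ∧ n ∉ sa.1 := ⟨hm, hs⟩
      have hB : n ∈ PySem.Set.ofList mask ∧ n ∉ sb.1 := ⟨(PySem.Set.mem_ofList _ _).mpr hm, h1 ▸ hnc⟩
      simp only [ctsVisitA, bVisit, if_pos hA, if_pos hB]
      rw [PySem.Set.add_of_not_mem hs, PySem.Set.add_of_not_mem hnc, PySem.Set.add_of_not_mem (h1 ▸ hnc)]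
      refine ⟨by rw [h1], by rw [h2], by rw [h3, List.append_assoc], by rw [h4, List.append_assoc], by simp, ?_, ?_⟩
      · intro c hc
        rcases List.mem_append.mp hc with h | h
        · exact h6 c h
        · simp only [List.mem_singleton] at h; subst h; exact ⟨hm, hn hm⟩
      · exact List.Nodup.append h7 (List.nodup_singleton n) (by simpa using hnc)
  · have hA : ¬ (n ∈ mask ∧ n ∉ sa.1) := fun hc => hm hc.1
    have hB : ¬ (n ∈ PySem.Set.ofList mask ∧ n ∉ sb.1) := fun hc => hm ((PySem.Set.mem_ofList _ _).mp hc.1)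
    simp only [ctsVisitA, bVisit, if_neg hA, if_neg hB]
    exact ⟨h1, h2, h3, h4, h5, h6, h7⟩

theorem ctsCell_rel {mask g comp0 : List (Int × Int)} {c : Int × Int}
    {sa : PySem.Set (Int × Int) × PySem.Set (Int × Int) × List (Int × Int)}
    {sb : PySem.Set (Int × Int) × List (Int × Int) × Bool}
    (hg : ctsGood mask g) (hc : c ∈ mask) (hcg : c ∉ g) (h : ctsRel mask g comp0 sa sb) :
    ctsRel mask g comp0 (ctsStepA mask c sa) (bCell (PySem.Set.ofList mask) c sb) := by
  unfold ctsStepA bCell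
  apply ctsVisit_rel (ctsNotG hg hc hcg (Or.inr (Or.inr (Or.inr rfl))))
  apply ctsVisit_rel (ctsNotG hg hc hcg (Or.inr (Or.inr (Or.inl rfl))))
  apply ctsVisit_rel (ctsNotG hg hc hcg (Or.inr (Or.inl rfl)))
  exact ctsVisit_rel (ctsNotG hg hc hcg (Or.inl rfl)) h

theorem ctsPass_rel {mask g comp0 : List (Int × Int)} (hg : ctsGood mask g) :
    ∀ (ring : List (Int × Int))
      (sa : PySem.Set (Int × Int) × PySem.Set (Int × Int) × List (Int × Int))
      (sb : PySem.Set (Int × Int) × List (Int × Int) × Bool),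
      (∀ c ∈ ring, c ∈ mask ∧ c ∉ g) → ctsRel mask g comp0 sa sb →
      ctsRel mask g comp0 (ctsRing mask ring sa) (bPass (PySem.Set.ofList mask) ring sb) := by
  intro ring
  induction ring with
  | nil => intro sa sb _ h; exact h
  | cons c rest ih =>
    intro sa sb hmem h
    have hc := hmem c (List.mem_cons_self ..)
    exact ih _ _ (fun x hx => hmem x (List.mem_cons_of_mem _ hx)) (ctsCell_rel hg hc.1 hc.2 h)

-- B's pass does nothing on cells whose in-mask neighbours are all already members
theorem bCell_noop {mask : List (Int × Int)} {c : Int × Int}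
    {sb : PySem.Set (Int × Int) × List (Int × Int) × Bool}
    (h : ∀ n, ctsAdj c n → n ∈ mask → n ∈ sb.1) :
    bCell (PySem.Set.ofList mask) c sb = sb := by
  have hv : ∀ (n : Int × Int), ctsAdj c n → bVisit (PySem.Set.ofList mask) n sb = sb := by
    intro n hadj
    have : ¬ (n ∈ PySem.Set.ofList mask ∧ n ∉ sb.1) := by
      intro hc
      exact hc.2 (h n hadj ((PySem.Set.mem_ofList _ _).mp hc.1))
    simp only [bVisit, if_neg this]
  unfold bCell
  rw [hv _ (Or.inl rfl), hv _ (Or.inr (Or.inl rfl)), hv _ (Or.inr (Or.inr (Or.inl rfl))),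
    hv _ (Or.inr (Or.inr (Or.inr rfl)))]

theorem bPass_prefix {mask : List (Int × Int)} :
    ∀ (done : List (Int × Int)) (sb : PySem.Set (Int × Int) × List (Int × Int) × Bool),
      (∀ c ∈ done, ∀ n, ctsAdj c n → n ∈ mask → n ∈ sb.1) →
      bPass (PySem.Set.ofList mask) done sb = sb := by
  intro done
  induction done with
  | nil => intro sb _; rfl
  | cons c rest ih =>
    intro sb h
    have hc := bCell_noop (h c (List.mem_cons_self ..))
    simp only [bPass, hc]
    exact ih sb (fun x hx => h x (List.mem_cons_of_mem _ hx))

theorem bPass_append (maskS : PySem.Set (Int × Int)) :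
    ∀ (l1 l2 : List (Int × Int)) (sb : PySem.Set (Int × Int) × List (Int × Int) × Bool),
      bPass maskS (l1 ++ l2) sb = bPass maskS l2 (bPass maskS l1 sb) := by
  intro l1
  induction l1 with
  | nil => intro l2 sb; rfl
  | cons c rest ih => intro l2 sb; simp only [List.cons_append, bPass, ih]

-- A's ring pass only grows `seen`
theorem ctsVisitA_seen_mono (mask : List (Int × Int)) (n : Int × Int)
    (sa : PySem.Set (Int × Int) × PySem.Set (Int × Int) × List (Int × Int)) :
    ∀ x ∈ sa.1, x ∈ (ctsVisitA mask n sa).1 := by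
  intro x hx
  by_cases h : n ∈ mask ∧ n ∉ sa.1
  · simp only [ctsVisitA, if_pos h]
    exact (PySem.Set.mem_add _ _ _).mpr (Or.inl hx)
  · simp [ctsVisitA, h, hx]

theorem ctsStepA_seen_mono (mask : List (Int × Int)) (c : Int × Int)
    (sa : PySem.Set (Int × Int) × PySem.Set (Int × Int) × List (Int × Int)) :
    ∀ x ∈ sa.1, x ∈ (ctsStepA mask c sa).1 := by
  intro x hx
  unfold ctsStepA
  exact ctsVisitA_seen_mono _ _ _ _ (ctsVisitA_seen_mono _ _ _ _ (ctsVisitA_seen_mono _ _ _ _ (ctsVisitA_seen_mono _ _ _ _ hx)))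

theorem ctsRing_seen_mono (mask : List (Int × Int)) :
    ∀ (ring : List (Int × Int)) (sa : PySem.Set (Int × Int) × PySem.Set (Int × Int) × List (Int × Int)),
      ∀ x ∈ sa.1, x ∈ (ctsRing mask ring sa).1 := by
  intro ring
  induction ring with
  | nil => intro sa x hx; exact hx
  | cons c rest ih =>
    intro sa x hx
    exact ih _ _ (ctsStepA_seen_mono mask c sa x hx)

-- after visiting n, an in-mask n is in `seen`
theorem ctsVisitA_seen_self (mask : List (Int × Int)) (n : Int × Int)
    (sa : PySem.Set (Int × Int) × PySem.Set (Int × Int) × List (Int × Int)) (hn : n ∈ mask) :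
    n ∈ (ctsVisitA mask n sa).1 := by
  by_cases h : n ∈ mask ∧ n ∉ sa.1
  · simp only [ctsVisitA, if_pos h]
    exact (PySem.Set.mem_add _ _ _).mpr (Or.inr rfl)
  · have : n ∈ sa.1 := by
      by_cases hs : n ∈ sa.1
      · exact hs
      · exact absurd ⟨hn, hs⟩ h
    simp [ctsVisitA, this]

-- after processing cell c, all its in-mask neighbours are in `seen`
theorem ctsStepA_procd (mask : List (Int × Int)) (c : Int × Int)
    (sa : PySem.Set (Int × Int) × PySem.Set (Int × Int) × List (Int × Int)) :
    ∀ n, ctsAdj c n → n ∈ mask → n ∈ (ctsStepA mask c sa).1 := by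
  intro n hadj hn
  unfold ctsStepA
  rcases hadj with h | h | h | h <;> subst h
  · exact ctsVisitA_seen_mono _ _ _ _ (ctsVisitA_seen_mono _ _ _ _ (ctsVisitA_seen_mono _ _ _ _ (ctsVisitA_seen_self _ _ _ hn)))
  · exact ctsVisitA_seen_mono _ _ _ _ (ctsVisitA_seen_mono _ _ _ _ (ctsVisitA_seen_self _ _ _ hn))
  · exact ctsVisitA_seen_mono _ _ _ _ (ctsVisitA_seen_self _ _ _ hn)
  · exact ctsVisitA_seen_self _ _ _ hn

theorem ctsRing_procd (mask : List (Int × Int)) :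
    ∀ (ring : List (Int × Int)) (sa : PySem.Set (Int × Int) × PySem.Set (Int × Int) × List (Int × Int)),
      ctsProcd mask (ctsRing mask ring sa).1 ring := by
  intro ring
  induction ring with
  | nil => intro sa c hc; exact absurd hc (List.not_mem_nil)
  | cons c rest ih =>
    intro sa x hx n hadj hn
    rcases List.mem_cons.mp hx with h | h
    · subst h
      exact ctsRing_seen_mono mask rest _ n (ctsStepA_procd mask x sa n hadj hn)
    · exact ih (ctsStepA mask c sa) x h n hadj hn

-- the core simulation: A's BFS continuation equals B's fixpoint loop
theorem ctsKey (mask g : List (Int × Int)) (hg : ctsGood mask g) :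
    ∀ (N : Nat) (comp done ring : List (Int × Int)),
      ctsUnseen (PySem.Set.ofList mask) comp = N →
      comp = done ++ ring →
      (∀ c ∈ comp, c ∈ mask ∧ c ∉ g) →
      comp.Nodup →
      ctsProcd mask (g ++ comp) done →
      ctsBfsA mask ring (g ++ comp) comp
          = (bLoop (PySem.Set.ofList mask) comp comp, g ++ bLoop (PySem.Set.ofList mask) comp comp)
        ∧ (∀ c ∈ bLoop (PySem.Set.ofList mask) comp comp, c ∈ mask ∧ c ∉ g)
        ∧ (bLoop (PySem.Set.ofList mask) comp comp).Nodup
        ∧ ctsProcd mask (g ++ bLoop (PySem.Set.ofList mask) comp comp) (bLoop (PySem.Set.ofList mask) comp comp) := by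
  intro N
  induction N using Nat.strong_induction_on with
  | _ N ih =>
    intro comp done ring hN hsplit hmem hnd hprocd
    -- the states after one round
    have hring_mem : ∀ c ∈ ring, c ∈ mask ∧ c ∉ g := by
      intro c hc; exact hmem c (hsplit ▸ List.mem_append.mpr (Or.inr hc))
    have hdone_mem : ∀ c ∈ done, c ∈ mask ∧ c ∉ g := by
      intro c hc; exact hmem c (hsplit ▸ List.mem_append.mpr (Or.inl hc))
    have hrel0 : ctsRel mask g comp (g ++ comp, comp, ([] : List (Int × Int))) (comp, comp, false) := by
      exact ⟨rfl, rfl, rfl, by simp, by simp, hmem, hnd⟩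
    have hrel := ctsPass_rel hg ring _ _ hring_mem hrel0
    set sa := ctsRing mask ring (g ++ comp, comp, ([] : List (Int × Int))) with hsa
    set sb := bPass (PySem.Set.ofList mask) ring (comp, comp, false) with hsb
    -- B's full round equals the pass over ring only
    have hBround : bPass (PySem.Set.ofList mask) comp (comp, comp, false) = sb := by
      nth_rewrite 1 [hsplit]
      rw [bPass_append]
      rw [bPass_prefix done (comp, comp, false)]
      intro c hc n hadj hn
      have hng : n ∉ g := ctsNotG hg (hdone_mem c hc).1 (hdone_mem c hc).2 hadj hn
      have : n ∈ g ++ comp := hprocd c hc n hadj hn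
      rcases List.mem_append.mp this with h | h
      · exact absurd h hng
      · exact h
    -- A's bfs continuation in ring form
    have hAstep : ctsBfsA mask ring (g ++ comp) comp = ctsBfsA mask sa.2.2 sa.1 sa.2.1 := by
      have := ctsBfsA_ring mask ring (g ++ comp) comp []
      simpa using this
    obtain ⟨r1, r2, r3, r4, r5, r6, r7⟩ := hrel
    have hco : ∀ {c : Int × Int}, c ∈ comp → c ∈ done ++ ring := fun hc => by rw [← hsplit]; exact hc
    by_cases hδ : sa.2.2 = []
    · -- no growth: both stop, comp is final
      have hcomp' : sa.2.1 = comp := by rw [r4, hδ, List.append_nil]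
      have hgrew : sb.2.2 = false := by rw [r5, hδ]; simp
      have hBstop : bLoop (PySem.Set.ofList mask) comp comp = comp := by
        rw [bLoop_eq]
        simp only [hBround, hgrew]
        simp
      have hAstop : ctsBfsA mask ring (g ++ comp) comp = (comp, g ++ comp) := by
        rw [hAstep, hδ, ctsBfsA_nil, hcomp', r3, hcomp']
      refine ⟨by rw [hAstop, hBstop], by rw [hBstop]; exact hmem, by rw [hBstop]; exact hnd, ?_⟩
      rw [hBstop]
      intro c hc n hadj hn
      rcases List.mem_append.mp (hco hc) with h | h
      · exact hprocd c h n hadj hn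
      · have := ctsRing_procd mask ring (g ++ comp, comp, ([] : List (Int × Int))) c h n hadj hn
        rw [← hsa] at this
        rw [r3, hcomp'] at this
        exact this
    · -- growth: recurse on the enlarged component
      have hgrew : sb.2.2 = true := by rw [r5]; simp [hδ]
      have hlt : ctsUnseen (PySem.Set.ofList mask) sb.1 < ctsUnseen (PySem.Set.ofList mask) comp := by
        have h := (bPass_measure (PySem.Set.ofList mask) ring (comp, comp, false)).2 (by rw [← hsb]; exact hgrew)
        rw [← hsb] at h
        simpa using h
      have hlt' : ctsUnseen (PySem.Set.ofList mask) sa.2.1 < N := by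
        rw [← hN, ← r1]; exact hlt
      have hBrec : bLoop (PySem.Set.ofList mask) comp comp = bLoop (PySem.Set.ofList mask) sa.2.1 sa.2.1 := by
        rw [bLoop_eq]
        simp only [hBround, hgrew]
        simp only [if_true]
        rw [r1, r2]
      have hprocd' : ctsProcd mask (g ++ sa.2.1) comp := by
        intro c hc n hadj hn
        rcases List.mem_append.mp (hco hc) with h | h
        · have := hprocd c h n hadj hn
          rcases List.mem_append.mp this with h' | h'
          · exact List.mem_append.mpr (Or.inl h')
          · exact List.mem_append.mpr (Or.inr (r4 ▸ List.mem_append.mpr (Or.inl h')))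
        · have := ctsRing_procd mask ring (g ++ comp, comp, ([] : List (Int × Int))) c h n hadj hn
          rw [← hsa, r3] at this
          exact this
      have := ih _ hlt' sa.2.1 comp sa.2.2 rfl r4 r6 r7 hprocd'
      rw [hAstep, r3]
      rw [hBrec]
      exact this

-- the outer loops agree
theorem ctsOuter_eq (mask : List (Int × Int)) :
    ∀ (starts : List (Int × Int)) (comps : List (List (Int × Int))) (seen : PySem.Set (Int × Int)),
      seen = comps.flatten → ctsGood mask seen →
      bOuter (PySem.Set.ofList mask) starts comps
        = ctsOuterA mask (starts.filter (fun s => decide (s ∈ mask))) seen comps := by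
  intro starts
  induction starts with
  | nil => intro comps seen _ _; simp [bOuter, ctsOuterA]
  | cons s rest ih =>
    intro comps seen hseen hgood
    have hany : ((comps.any (fun c => PySem.Set.contains c s)) = true) ↔ s ∈ seen := by
      rw [hseen, List.any_eq_true]
      constructor
      · rintro ⟨c, hc, hcs⟩
        exact List.mem_flatten.mpr ⟨c, hc, (PySem.Set.contains_iff c s).mp hcs⟩
      · intro h
        obtain ⟨c, hc, hcs⟩ := List.mem_flatten.mp h
        exact ⟨c, hc, (PySem.Set.contains_iff c s).mpr hcs⟩
    by_cases hm : s ∈ mask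
    · by_cases hs : s ∈ seen
      · have hguard : (s ∉ PySem.Set.ofList mask ∨ (comps.any (fun c => PySem.Set.contains c s)) = true) :=
          Or.inr (hany.mpr hs)
        simp only [bOuter, if_pos hguard, List.filter_cons, decide_eq_true_eq]
        rw [if_pos hm]
        simp only [ctsOuterA, if_pos hs]
        exact ih comps seen hseen hgood
      · have hguard : ¬ (s ∉ PySem.Set.ofList mask ∨ (comps.any (fun c => PySem.Set.contains c s)) = true) := by
          rintro (h | h)
          · exact h ((PySem.Set.mem_ofList _ _).mpr hm)
          · exact hs (hany.mp h)
        simp only [bOuter, if_neg hguard, List.filter_cons, decide_eq_true_eq]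
        rw [if_pos hm]
        simp only [ctsOuterA, if_neg hs]
        have hadd : PySem.Set.add seen s = seen ++ [s] := PySem.Set.add_of_not_mem hs
        have hofl : PySem.Set.ofList [s] = [s] := by simp [PySem.Set.ofList_eq_self_of_nodup]
        have hkey := ctsKey mask seen hgood (ctsUnseen (PySem.Set.ofList mask) [s]) [s] [] [s] rfl rfl
          (by intro c hc; simp only [List.mem_singleton] at hc; subst hc; exact ⟨hm, hs⟩)
          (List.nodup_singleton s)
          (by intro c hc; exact absurd hc (List.not_mem_nil))
        obtain ⟨hr, hCmem, hCnd, hCprocd⟩ := hkey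
        set C := bLoop (PySem.Set.ofList mask) [s] [s] with hC
        have hr' : ctsBfsA mask [s] (PySem.Set.add seen s) (PySem.Set.ofList [s]) = (C, seen ++ C) := by
          rw [hadd, hofl, hr]
        have hoflC : PySem.Set.ofList C = C := PySem.Set.ofList_eq_self_of_nodup C hCnd
        rw [hr', hofl, hoflC]
        apply ih
        · rw [hseen]; simp
        · constructor
          · intro c hc
            rcases List.mem_append.mp hc with h | h
            · exact hgood.1 c h
            · exact (hCmem c h).1
          · intro c hc n hadj hn
            rcases List.mem_append.mp hc with h | h
            · have := hgood.2 c h n hadj hn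
              exact List.mem_append.mpr (Or.inl this)
            · exact hCprocd c h n hadj hn
    · have hguard : (s ∉ PySem.Set.ofList mask ∨ (comps.any (fun c => PySem.Set.contains c s)) = true) :=
        Or.inl (fun h => hm ((PySem.Set.mem_ofList _ _).mp h))
      simp only [bOuter, if_pos hguard, List.filter_cons, decide_eq_true_eq]
      rw [if_neg hm]
      exact ih comps seen hseen hgood

-- ===== VERDICT (by name: the statement is the Claim_ definition above) =====
theorem components_touching_starts_py_spec : Claim_equal_components_touching_starts_py := by
  intro mask starts _
  unfold Spec_components_touching_starts_py
  unfold components_touching_starts_py components_touching_starts_py_alt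
  rw [ctsOuter_eq mask starts [] PySem.Set.empty rfl ⟨by intro c hc; exact absurd hc (List.not_mem_nil), by intro c hc; exact absurd hc (List.not_mem_nil)⟩]
  by_cases h : starts.filter (fun s => decide (s ∈ mask)) = [] <;> simp [h, ctsOuterA, PySem.Set.empty]
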